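-- pv_equiv track=rewrite | github.com/TangRuiBo/IBI1_2025-26 | Practical7/count_codons.py | count_codon_frequency
-- ===== SOURCE A (Python) =====
-- from collections import Counter
--
-- def count_codon_frequency(sequences, target_stop):
--     codon_count = Counter()
--     for seq in sequences:
--         max_orf = ""
--         for i in range(0, len(seq)-2, 3):
--             if seq[i:i+3] == "ATG":
--                 for j in range(i, len(seq)-2, 3):
--                     codon = seq[j:j+3]
--                     if codon == target_stop:
--                         orf_candidate = seq[i:j+3]
--                         if len(orf_candidate) > len(max_orf):
--                             max_orf = orf_candidate
--                         break
--         if max_orf: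
--             for k in range(0, len(max_orf)-3, 3):
--                 codon = max_orf[k:k+3]
--                 codon_count[codon] += 1
--     return codon_count
-- ===== SOURCE B (Python) =====
-- def count_codon_frequency(sequences, target_stop):
--     counts = {}
--     for seq in sequences:
--         # split the frame-0 part of the sequence into complete codons once
--         codons = []
--         i = 0
--         while i + 3 <= len(seq):
--             codons.append(seq[i:i+3])
--             i += 3
--         m = len(codons)
--         # one backward pass: nxt = index of first stop codon at or after k;
--         # best = (start, stop) of the longest ORF, earliest start on ties
--         nxt = None
--         best = None
--         for k in range(m - 1, -1, -1):
--             c = codons[k]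
--             if c == target_stop:
--                 nxt = k
--             if c == "ATG" and nxt is not None and (best is None or nxt - k >= best[1] - best[0]):
--                 best = (k, nxt)
--         if best is not None:
--             for c in codons[best[0]:best[1]]:
--                 counts[c] = counts.get(c, 0) + 1
--     return counts
-- ===== Notes on version B (the rewrite author's own statement) =====
-- stated objective: alternative
-- what changed: A rescans forward from every ATG to find its stop codon and re-slices the string for every codon; B splits each sequence into a codon list once and finds every ATG's next stop in a single backward pass that carries the next-stop index and the best ORF, then counts codons from the codon list.
import Mathlib
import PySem

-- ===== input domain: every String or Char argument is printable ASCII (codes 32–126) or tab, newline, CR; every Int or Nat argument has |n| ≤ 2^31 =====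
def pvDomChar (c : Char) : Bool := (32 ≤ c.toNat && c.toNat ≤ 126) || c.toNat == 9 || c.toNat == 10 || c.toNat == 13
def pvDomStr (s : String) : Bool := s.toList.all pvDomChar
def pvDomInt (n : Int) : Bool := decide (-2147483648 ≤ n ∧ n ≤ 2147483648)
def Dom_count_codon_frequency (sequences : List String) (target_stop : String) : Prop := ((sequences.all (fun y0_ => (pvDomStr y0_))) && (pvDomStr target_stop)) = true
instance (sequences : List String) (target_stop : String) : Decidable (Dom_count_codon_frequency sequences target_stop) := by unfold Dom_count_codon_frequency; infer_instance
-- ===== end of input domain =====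

-- Alternative algorithm: instead of A's nested ATG→stop rescans over string slices, B
-- splits each sequence into a codon list once and finds every ATG's next stop (and the
-- best ORF) in a single backward pass; same return value.


-- ===== PORT A =====
-- inner 'for j in range(i, len(seq)-2, 3): … break' loop (break = stop recursing)
def pvA_findJ (seq target : String) (i : Int) (max_orf : String) : List Int → String
  | [] => max_orf
  | j :: rest =>
    let codon := PySem.Str.slice seq (some j) (some (j + 3))
    if codon == target then
      let orf_candidate := PySem.Str.slice seq (some i) (some (j + 3))
      if PySem.Str.len orf_candidate > PySem.Str.len max_orf then orf_candidate else max_orf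
    else pvA_findJ seq target i max_orf rest

-- body of 'for seq in sequences'
def pvA_seqStep (target : String) (d : PySem.Dict String Int) (seq : String) : PySem.Dict String Int :=
  let max_orf : String :=
    (PySem.List.pyRange 0 (PySem.Str.len seq - 2) 3).foldl
      (fun max_orf i =>
        if PySem.Str.slice seq (some i) (some (i + 3)) == "ATG" then
          pvA_findJ seq target i max_orf (PySem.List.pyRange i (PySem.Str.len seq - 2) 3)
        else max_orf) ""
  if max_orf == "" then d
  else
    (PySem.List.pyRange 0 (PySem.Str.len max_orf - 3) 3).foldl
      (fun d k => d.modify (PySem.Str.slice max_orf (some k) (some (k + 3))) 0 (· + 1)) d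

def count_codon_frequency (sequences : List String) (target_stop : String) : List (String × Int) :=
  (sequences.foldl (fun d seq => pvA_seqStep target_stop d seq) PySem.Dict.empty).items

-- ===== PORT B =====
-- 'while i + 3 <= len(seq): codons.append(seq[i:i+3]); i += 3'
def pvB_codons : List Char → List String
  | a :: b :: c :: rest => String.ofList [a, b, c] :: pvB_codons rest
  | _ => []

def pvB_seqStep (target : String) (d : PySem.Dict String Int) (seq : String) : PySem.Dict String Int :=
  let codons := pvB_codons seq.toList
  let m : Int := codons.length
  -- 'for k in range(m-1, -1, -1)' carrying (nxt, best)
  let st :=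
    (PySem.List.pyRange (m - 1) (-1) (-1)).foldl
      (fun (st : Option Int × Option (Int × Int)) k =>
        let c := PySem.List.pyGetD codons k ""
        let nxt := if c == target then some k else st.1
        let best :=
          if c == "ATG" then
            match nxt with
            | none => st.2
            | some j =>
              match st.2 with
              | none => some (k, j)
              | some (bs, bj) => if j - k ≥ bj - bs then some (k, j) else some (bs, bj)
          else st.2
        (nxt, best)) (none, none)
  match st.2 with
  | none => d
  | some (s, j) =>
    (PySem.List.slice codons (some s) (some j)).foldl
      (fun d c => d.insert c (d.getD c 0 + 1)) d

def count_codon_frequency_alt (sequences : List String) (target_stop : String) : List (String × Int) :=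
  (sequences.foldl (fun d seq => pvB_seqStep target_stop d seq) PySem.Dict.empty).items

-- ===== PRECONDITION & SPEC =====
def Spec_count_codon_frequency (sequences : List String) (target_stop : String) (out : List (String × Int)) : Prop := out = count_codon_frequency_alt sequences target_stop
instance (sequences : List String) (target_stop : String) (out : List (String × Int)) : Decidable (Spec_count_codon_frequency sequences target_stop out) := by unfold Spec_count_codon_frequency; infer_instance

-- ===== CLAIM (what is proved, stated in full; the proofs are below) =====
def Claim_equal_count_codon_frequency : Prop := ∀ (sequences : List String) (target_stop : String), Dom_count_codon_frequency sequences target_stop → Spec_count_codon_frequency sequences target_stop (count_codon_frequency sequences target_stop)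

-- ===== LEMMAS AND PROOFS =====

-- forward update (A: replace on strictly longer) and backward update (B: replace on ≥)
def pvUpdA (b : Option (Nat × Nat)) (c : Nat × Nat) : Option (Nat × Nat) :=
  match b with
  | none => some c
  | some b0 => if c.2 - c.1 > b0.2 - b0.1 then some c else some b0

def pvUpdB (b : Option (Nat × Nat)) (c : Nat × Nat) : Option (Nat × Nat) :=
  match b with
  | none => some c
  | some b0 => if c.2 - c.1 ≥ b0.2 - b0.1 then some c else some b0


-- ===== L0: codon list structure =====
theorem pvB_codons_length (s : List Char) : (pvB_codons s).length = s.length / 3 := by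
  fun_induction pvB_codons with
  | case1 a b c rest ih => simp [ih]; omega
  | case2 s h =>
    match s, h with
    | [], _ => rfl
    | [a], _ => simp
    | [a, b], _ => simp
    | a :: b :: c :: r, h => exact absurd rfl (h a b c r)

theorem pvB_codons_getD (s : List Char) (k : Nat) (hk : k < (pvB_codons s).length) (x : String) :
    (pvB_codons s).getD k x = String.ofList ((s.drop (3*k)).take 3) := by
  induction s using pvB_codons.induct generalizing k with
  | case1 a b c rest ih =>
    cases k with
    | zero => simp [pvB_codons]
    | succ k' =>
      simp only [pvB_codons] at hk ⊢
      simp only [List.length_cons, Nat.succ_lt_succ_iff] at hk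
      rw [List.getD_cons_succ, ih k' hk]
      have : 3 * (k' + 1) = (3 * k' + 1) + 1 + 1 := by omega
      simp [this]
  | case2 s h =>
    match s, h with
    | [], _ => simp [pvB_codons] at hk
    | [a], _ => simp [pvB_codons] at hk
    | [a, b], _ => simp [pvB_codons] at hk
    | a :: b :: c :: r, h => exact absurd rfl (h a b c r)

-- ===== range helpers =====
theorem pvRange3_nil (a b : Int) (h : b ≤ a) : PySem.List.pyRange a b 3 = [] := by
  rw [PySem.List.pyRange_of_pos a b (by norm_num)]
  simp [show ¬ a < b by omega]

theorem pvRange3_cons (a b : Int) (h : a < b) : PySem.List.pyRange a b 3 = a :: PySem.List.pyRange (a + 3) b 3 := by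
  rw [PySem.List.pyRange_of_pos a b (by norm_num), PySem.List.pyRange_of_pos (a + 3) b (by norm_num)]
  have h1 : ((b - a + 3 - 1) / 3).toNat = ((b - (a + 3) + 3 - 1) / 3).toNat + 1 := by omega
  by_cases h2 : a + 3 < b
  · simp only [if_pos h, if_pos h2, h1, List.range_succ_eq_map, List.map_cons, List.map_map]
    refine List.cons_eq_cons.mpr ⟨by push_cast; ring, ?_⟩
    apply List.map_congr_left; intro q _; simp [Function.comp]; push_cast; ring
  · have h3 : ((b - a + 3 - 1) / 3).toNat = 1 := by omega
    simp [if_pos h, if_neg h2, h3, List.range_succ]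

-- ===== first stop at or after k (specification) =====
def pvFSA (t : String) : List String → Nat → Option Nat
  | [], _ => none
  | c :: rest, k => if c = t then some k else pvFSA t rest (k + 1)

def pvFS (t : String) (cs : List String) (k : Nat) : Option Nat := pvFSA t (cs.drop k) k

theorem pvFS_none (t : String) (cs : List String) (k : Nat) (h : cs.length ≤ k) :
    pvFS t cs k = none := by
  unfold pvFS
  rw [List.drop_eq_nil_of_le h]
  rfl

theorem pvFS_step (t : String) (cs : List String) (k : Nat) (h : k < cs.length) :
    pvFS t cs k = if cs.getD k "" = t then some k else pvFS t cs (k + 1) := by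
  unfold pvFS
  rw [List.drop_eq_getElem_cons h]
  simp [pvFSA, List.getElem?_eq_getElem h]

theorem pvFSA_bounds (t : String) (l : List String) (k0 j : Nat) (h : pvFSA t l k0 = some j) :
    k0 ≤ j ∧ j < k0 + l.length := by
  induction l generalizing k0 with
  | nil => simp [pvFSA] at h
  | cons c rest ih =>
    simp only [pvFSA] at h
    simp only [List.length_cons]
    split at h
    · cases h; omega
    · obtain ⟨h1, h2⟩ := ih (k0 + 1) h
      omega

theorem pvFS_bounds (t : String) (cs : List String) (k j : Nat) (h : pvFS t cs k = some j) :
    k ≤ j ∧ j < cs.length := by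
  have := pvFSA_bounds t (cs.drop k) k j h
  rcases this with ⟨h1, h2⟩
  rw [List.length_drop] at h2
  constructor
  · exact h1
  · omega

-- ===== L1: string slices of seq are the codons =====
theorem pvSlice_toList (seq : String) (a b : Int) :
    (PySem.Str.slice seq (some a) (some b)).toList = PySem.List.slice seq.toList (some a) (some b) := by
  simp [pysem]

theorem pvCodon_slice (seq : String) (k : Nat) (hk : k < (pvB_codons seq.toList).length) :
    PySem.Str.slice seq (some ((3 * k : Nat) : Int)) (some (((3 * k : Nat) : Int) + 3)) =
      (pvB_codons seq.toList).getD k "" := by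
  apply String.toList_inj.mp
  rw [pvSlice_toList]
  have h3 : ((3 * k : Nat) : Int) + 3 = (((3 * k + 3 : Nat)) : Int) := by push_cast; ring
  rw [h3, PySem.List.slice_natCast, pvB_codons_getD seq.toList k hk]
  simp

-- candidate string and its length
theorem pvCand_slice (seq : String) (k0 j : Nat) (hk0 : k0 ≤ j) :
    PySem.Str.slice seq (some ((3 * k0 : Nat) : Int)) (some (((3 * j : Nat) : Int) + 3)) =
      String.ofList ((seq.toList.drop (3 * k0)).take (3 * (j - k0) + 3)) := by
  apply String.toList_inj.mp
  have h3 : ((3 * j : Nat) : Int) + 3 = (((3 * j + 3 : Nat)) : Int) := by push_cast; ring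
  rw [pvSlice_toList, h3, PySem.List.slice_natCast]
  simp only [String.toList_ofList]
  congr 1
  omega

theorem pvTake_len (l : List Char) (a b : Nat) (h : a + b ≤ l.length) :
    ((l.drop a).take b).length = b := by
  simp [List.length_take, List.length_drop]
  omega

-- ===== L4: the inner j-loop finds the first stop =====
theorem pvA_findJ_spec (seq t : String) (k0 k : Nat) (w : String)
    (hk0 : k0 ≤ k) (hk : k ≤ (pvB_codons seq.toList).length) :
    pvA_findJ seq t ((3 * k0 : Nat) : Int) w
        (PySem.List.pyRange ((3 * k : Nat) : Int) ((seq.toList.length : Int) - 2) 3) =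
      match pvFS t (pvB_codons seq.toList) k with
      | none => w
      | some j =>
        if ((3 * (j - k0) + 3 : Nat) : Int) > PySem.Str.len w then
          String.ofList ((seq.toList.drop (3 * k0)).take (3 * (j - k0) + 3))
        else w := by
  have hmn : (pvB_codons seq.toList).length = seq.toList.length / 3 := pvB_codons_length _
  induction hd : (pvB_codons seq.toList).length - k generalizing k w with
  | zero =>
    have hnil : PySem.List.pyRange ((3 * k : Nat) : Int) ((seq.toList.length : Int) - 2) 3 = [] := by
      apply pvRange3_nil; push_cast; omega
    rw [hnil, pvFS_none t (pvB_codons seq.toList) k (by omega)]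
    rfl
  | succ d ih =>
    have hklt : k < (pvB_codons seq.toList).length := by omega
    have hcons : PySem.List.pyRange ((3 * k : Nat) : Int) ((seq.toList.length : Int) - 2) 3 =
        ((3 * k : Nat) : Int) ::
          PySem.List.pyRange ((3 * (k + 1) : Nat) : Int) ((seq.toList.length : Int) - 2) 3 := by
      have h31 : ((3 * k : Nat) : Int) + 3 = ((3 * (k + 1) : Nat) : Int) := by push_cast; ring
      rw [pvRange3_cons _ _ (by push_cast; omega), h31]
    rw [hcons]
    simp only [pvA_findJ]
    rw [pvCodon_slice seq k hklt]
    by_cases hct : (pvB_codons seq.toList).getD k "" = t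
    · rw [pvCand_slice seq k0 k hk0]
      rw [pvFS_step t (pvB_codons seq.toList) k hklt, if_pos hct]
      have hbeq : ((pvB_codons seq.toList).getD k "" == t) = true := beq_iff_eq.mpr hct
      have hlen : PySem.Str.len (String.ofList ((seq.toList.drop (3 * k0)).take (3 * (k - k0) + 3))) =
          ((3 * (k - k0) + 3 : Nat) : Int) := by
        rw [PySem.Str.len_eq]
        congr 1
        simp only [String.toList_ofList]
        exact pvTake_len seq.toList (3 * k0) (3 * (k - k0) + 3) (by omega)
      simp only [hbeq, if_true, hlen]
    · have hbeq : ((pvB_codons seq.toList).getD k "" == t) = false := by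
        simp only [beq_eq_false_iff_ne, ne_eq]
        exact hct
      simp only [hbeq, Bool.false_eq_true, if_false]
      rw [pvFS_step t (pvB_codons seq.toList) k hklt, if_neg (by exact hct)]
      exact ih (k + 1) w (by omega) (by omega) (by omega)

-- ===== candidates and the ORF string =====
def pvCandsFrom (t : String) (cs : List String) (k : Nat) : List (Nat × Nat) :=
  (List.range (cs.length - k)).filterMap (fun q =>
    if cs.getD (k + q) "" = "ATG" then (pvFS t cs (k + q)).map (fun j => (k + q, j)) else none)

theorem pvCandsFrom_nil (t : String) (cs : List String) (k : Nat) (h : cs.length ≤ k) :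
    pvCandsFrom t cs k = [] := by
  unfold pvCandsFrom
  rw [show cs.length - k = 0 by omega]
  rfl

theorem pvCandsFrom_cons (t : String) (cs : List String) (k : Nat) (h : k < cs.length) :
    pvCandsFrom t cs k =
      (if cs.getD k "" = "ATG" then ((pvFS t cs k).map (fun j => (k, j))).toList else []) ++
        pvCandsFrom t cs (k + 1) := by
  unfold pvCandsFrom
  rw [show cs.length - k = (cs.length - (k + 1)) + 1 by omega, List.range_succ_eq_map,
      List.filterMap_cons, List.filterMap_map]
  have hfun : ((fun q => if cs.getD (k + q) "" = "ATG" then (pvFS t cs (k + q)).map (fun j => (k + q, j)) else none) ∘ Nat.succ)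
      = (fun q => if cs.getD (k + 1 + q) "" = "ATG" then (pvFS t cs (k + 1 + q)).map (fun j => (k + 1 + q, j)) else none) := by
    funext q
    simp only [Function.comp_apply, Nat.succ_eq_add_one]
    rw [show k + (q + 1) = k + 1 + q by omega]
  rw [hfun]
  simp only [Nat.add_zero]
  by_cases hatg : cs.getD k "" = "ATG"
  · simp only [if_pos hatg]
    cases hfs : (pvFS t cs k).map (fun j => (k, j)) with
    | none => simp
    | some b => simp
  · simp only [if_neg hatg]
    simp

def pvOrfStr (s : List Char) : Option (Nat × Nat) → String
  | none => ""
  | some (p, q) => String.ofList ((s.drop (3 * p)).take (3 * (q - p) + 3))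

def pvWF (m : Nat) : Option (Nat × Nat) → Prop
  | none => True
  | some (p, q) => p ≤ q ∧ q < m

theorem pvOrfStr_len (seq : String) (b : Option (Nat × Nat))
    (hwf : pvWF ((pvB_codons seq.toList).length) b) :
    PySem.Str.len (pvOrfStr seq.toList b) =
      ((match b with | none => 0 | some (p, q) => 3 * (q - p) + 3 : Nat) : Int) := by
  have hmn : (pvB_codons seq.toList).length = seq.toList.length / 3 := pvB_codons_length _
  match b with
  | none => simp [pvOrfStr, PySem.Str.len]
  | some (p, q) =>
    obtain ⟨h1, h2⟩ := hwf
    rw [PySem.Str.len_eq]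
    simp only [pvOrfStr, String.toList_ofList]
    congr 1
    exact pvTake_len seq.toList (3 * p) (3 * (q - p) + 3) (by omega)

theorem pvWF_updA (m : Nat) (b : Option (Nat × Nat)) (c : Nat × Nat)
    (hb : pvWF m b) (hc : c.1 ≤ c.2 ∧ c.2 < m) : pvWF m (pvUpdA b c) := by
  match b with
  | none => exact hc
  | some (p, q) =>
    simp only [pvUpdA]
    split
    · exact hc
    · exact hb

-- ===== L5: A's outer loop computes the forward-fold over the candidates =====
theorem pvA_fold_spec (seq t : String) (k : Nat) (hk : k ≤ (pvB_codons seq.toList).length)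
    (b : Option (Nat × Nat)) (hwf : pvWF ((pvB_codons seq.toList).length) b) :
    (PySem.List.pyRange ((3 * k : Nat) : Int) ((seq.toList.length : Int) - 2) 3).foldl
      (fun max_orf i =>
        if PySem.Str.slice seq (some i) (some (i + 3)) == "ATG" then
          pvA_findJ seq t i max_orf (PySem.List.pyRange i ((seq.toList.length : Int) - 2) 3)
        else max_orf) (pvOrfStr seq.toList b) =
      pvOrfStr seq.toList (List.foldl pvUpdA b (pvCandsFrom t (pvB_codons seq.toList) k)) := by
  have hmn : (pvB_codons seq.toList).length = seq.toList.length / 3 := pvB_codons_length _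
  induction hd : (pvB_codons seq.toList).length - k generalizing k b with
  | zero =>
    rw [pvRange3_nil _ _ (by push_cast; omega), pvCandsFrom_nil t _ k (by omega)]
    rfl
  | succ d ih =>
    have hklt : k < (pvB_codons seq.toList).length := by omega
    have hcons : PySem.List.pyRange ((3 * k : Nat) : Int) ((seq.toList.length : Int) - 2) 3 =
        ((3 * k : Nat) : Int) ::
          PySem.List.pyRange ((3 * (k + 1) : Nat) : Int) ((seq.toList.length : Int) - 2) 3 := by
      have h31 : ((3 * k : Nat) : Int) + 3 = ((3 * (k + 1) : Nat) : Int) := by push_cast; ring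
      rw [pvRange3_cons _ _ (by push_cast; omega), h31]
    rw [hcons, pvCandsFrom_cons t _ k hklt]
    simp only [List.foldl_cons, List.foldl_append]
    by_cases hatg : (pvB_codons seq.toList).getD k "" = "ATG"
    · have hbeq : (PySem.Str.slice seq (some ((3 * k : Nat) : Int)) (some (((3 * k : Nat) : Int) + 3)) == "ATG") = true := by
        rw [pvCodon_slice seq k hklt]
        exact beq_iff_eq.mpr hatg
      rw [hbeq, if_pos rfl, if_pos hatg]
      rw [pvA_findJ_spec seq t k k (pvOrfStr seq.toList b) le_rfl (by omega)]
      cases hfs : pvFS t (pvB_codons seq.toList) k with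
      | none =>
        simp only [Option.map_none, Option.toList_none, List.foldl_nil]
        exact ih (k + 1) (by omega) b hwf (by omega)
      | some j =>
        obtain ⟨hkj, hjm⟩ := pvFS_bounds t _ k j hfs
        simp only [Option.map_some, Option.toList_some, List.foldl_cons, List.foldl_nil]
        rw [pvOrfStr_len seq b hwf]
        have hstep : (if ((3 * (j - k) + 3 : Nat) : Int) >
              ((match b with | none => 0 | some (p, q) => 3 * (q - p) + 3 : Nat) : Int) then
            String.ofList ((seq.toList.drop (3 * k)).take (3 * (j - k) + 3))
          else pvOrfStr seq.toList b) = pvOrfStr seq.toList (pvUpdA b (k, j)) := by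
        
          match b with
          | none =>
            have hpos : ((3 * (j - k) + 3 : Nat) : Int) > ((0 : Nat) : Int) := by
              exact_mod_cast Nat.succ_pos _
            rw [if_pos hpos]
            rfl
          | some (p, q) =>
            obtain ⟨hpq, hqm⟩ := hwf
            by_cases hgt : j - k > q - p
            · rw [if_pos (by exact_mod_cast (by omega : (3 * (j - k) + 3) > 3 * (q - p) + 3))]
              simp only [pvUpdA, if_pos hgt]
              rfl
            · rw [if_neg (by exact_mod_cast (by omega : ¬ (3 * (j - k) + 3) > 3 * (q - p) + 3))]
              simp only [pvUpdA]
              rw [if_neg (by omega)]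
        rw [hstep]
        exact ih (k + 1) (by omega) (pvUpdA b (k, j)) (pvWF_updA _ b (k, j) hwf ⟨hkj, hjm⟩) (by omega)
    · have hbeq : (PySem.Str.slice seq (some ((3 * k : Nat) : Int)) (some (((3 * k : Nat) : Int) + 3)) == "ATG") = false := by
        rw [pvCodon_slice seq k hklt]
        simp only [beq_eq_false_iff_ne, ne_eq]
        exact hatg
      rw [hbeq, if_neg hatg]
      simp only [Bool.false_eq_true, if_false, List.nil_append, List.foldl_nil]
      exact ih (k + 1) (by omega) b hwf (by omega)

-- ===== forward strict-max fold (A) = backward ≥-max fold (B) =====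
theorem pvUpdA_some (a : Nat × Nat) (l : List (Nat × Nat)) :
    ∃ c, List.foldl pvUpdA (some a) l = some c ∧ a.2 - a.1 ≤ c.2 - c.1 := by
  induction l generalizing a with
  | nil => exact ⟨a, rfl, le_rfl⟩
  | cons x xs ih =>
    simp only [List.foldl_cons, pvUpdA]
    split
    · obtain ⟨c, hc, hle⟩ := ih x
      exact ⟨c, hc, by omega⟩
    · exact ih a

theorem pvUpdB_absorb (r : Option (Nat × Nat)) (c a : Nat × Nat) (h : c.2 - c.1 ≤ a.2 - a.1) :
    pvUpdB (pvUpdB r c) a = pvUpdB r a := by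
  match r with
  | none =>
    show pvUpdB (some c) a = pvUpdB none a
    simp only [pvUpdB]
    rw [if_pos (by omega)]
  | some r0 =>
    by_cases h1 : c.2 - c.1 ≥ r0.2 - r0.1
    · rw [show pvUpdB (some r0) c = some c by simp only [pvUpdB]; rw [if_pos h1]]
      by_cases h2 : a.2 - a.1 ≥ r0.2 - r0.1
      · simp only [pvUpdB]
        rw [if_pos (by omega), if_pos h2]
      · omega
    · rw [show pvUpdB (some r0) c = some r0 by simp only [pvUpdB]; rw [if_neg h1]]

theorem pvFoldAB (l : List (Nat × Nat)) (a : Nat × Nat) :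
    List.foldl pvUpdA (some a) l = pvUpdB (List.foldl pvUpdA none l) a := by
  induction l generalizing a with
  | nil => rfl
  | cons c l' ih =>
    simp only [List.foldl_cons]
    show List.foldl pvUpdA (pvUpdA (some a) c) l' = pvUpdB (List.foldl pvUpdA (some c) l') a
    simp only [pvUpdA]
    by_cases hca : c.2 - c.1 > a.2 - a.1
    · rw [if_pos hca]
      obtain ⟨r, hr, hle⟩ := pvUpdA_some c l'
      rw [hr]
      simp only [pvUpdB]
      rw [if_neg (by omega)]
    · rw [if_neg hca]
      rw [ih a, ih c]
      exact (pvUpdB_absorb _ c a (by omega)).symm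

theorem pvK4 (l : List (Nat × Nat)) :
    List.foldl pvUpdB none l.reverse = List.foldl pvUpdA none l := by
  induction l with
  | nil => rfl
  | cons a l' ih =>
    simp only [List.reverse_cons, List.foldl_append, List.foldl_cons, List.foldl_nil, ih]
    rw [show pvUpdA none a = some a from rfl, pvFoldAB]

-- ===== B-side: countdown range and fold invariant =====
theorem pvRangeNeg_nil (m : Nat) :
    PySem.List.pyRange ((m : Int) - 1) ((m : Int) - 1) (-1) = [] := by
  rw [PySem.List.pyRange_neg_one]
  simp

theorem pvRangeNeg_snoc (m k : Nat) (h : k < m) :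
    PySem.List.pyRange ((m : Int) - 1) ((k : Int) - 1) (-1) =
      PySem.List.pyRange ((m : Int) - 1) (((k + 1 : Nat) : Int) - 1) ((-1) : Int) ++ [(k : Int)] := by
  rw [PySem.List.pyRange_neg_one, PySem.List.pyRange_neg_one]
  have h1 : (((m : Int) - 1) - ((k : Int) - 1)).toNat = (m - k - 1) + 1 := by omega
  have h2 : (((m : Int) - 1) - (((k + 1 : Nat) : Int) - 1)).toNat = m - k - 1 := by omega
  rw [h1, h2, List.range_succ, List.map_append]
  congr 1
  simp only [List.map_cons, List.map_nil]
  congr 1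
  omega

theorem pvCandsFrom_mem_wf (t : String) (cs : List String) (k : Nat) (c : Nat × Nat)
    (hc : c ∈ pvCandsFrom t cs k) : c.1 ≤ c.2 ∧ c.2 < cs.length := by
  unfold pvCandsFrom at hc
  rw [List.mem_filterMap] at hc
  obtain ⟨q, _, hq⟩ := hc
  split at hq
  · rw [Option.map_eq_some_iff] at hq
    obtain ⟨j, hj, hcj⟩ := hq
    obtain ⟨hb1, hb2⟩ := pvFS_bounds t cs (k + q) j hj
    subst hcj
    exact ⟨hb1, hb2⟩
  · simp at hq

theorem pvUpdB_fold_wf (m : Nat) (l : List (Nat × Nat)) (hl : ∀ c ∈ l, c.1 ≤ c.2 ∧ c.2 < m)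
    (b : Option (Nat × Nat)) (hb : pvWF m b) : pvWF m (List.foldl pvUpdB b l) := by
  induction l generalizing b with
  | nil => exact hb
  | cons c l' ih =>
    apply ih (fun x hx => hl x (List.mem_cons_of_mem c hx))
    have hc := hl c List.mem_cons_self
    match b with
    | none => exact ⟨hc.1, hc.2⟩
    | some b0 =>
      simp only [pvUpdB]
      split
      · exact ⟨hc.1, hc.2⟩
      · exact hb

theorem pvUpdA_fold_wf (m : Nat) (l : List (Nat × Nat)) (hl : ∀ c ∈ l, c.1 ≤ c.2 ∧ c.2 < m)
    (b : Option (Nat × Nat)) (hb : pvWF m b) : pvWF m (List.foldl pvUpdA b l) := by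
  induction l generalizing b with
  | nil => exact hb
  | cons c l' ih =>
    apply ih (fun x hx => hl x (List.mem_cons_of_mem c hx))
    exact pvWF_updA m b c hb (hl c List.mem_cons_self)

-- ===== L6: B's backward loop computes (first stop from k, ≥-fold of candidates from k) =====
theorem pvB_fold_spec (seq t : String) (k : Nat) (hk : k ≤ (pvB_codons seq.toList).length) :
    (PySem.List.pyRange (((pvB_codons seq.toList).length : Int) - 1) ((k : Int) - 1) (-1)).foldl
      (fun (st : Option Int × Option (Int × Int)) k =>
        let c := PySem.List.pyGetD (pvB_codons seq.toList) k ""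
        let nxt := if c == t then some k else st.1
        let best :=
          if c == "ATG" then
            match nxt with
            | none => st.2
            | some j =>
              match st.2 with
              | none => some (k, j)
              | some (bs, bj) => if j - k ≥ bj - bs then some (k, j) else some (bs, bj)
          else st.2
        (nxt, best)) (none, none) =
      ((pvFS t (pvB_codons seq.toList) k).map (fun j : Nat => (j : Int)),
        (List.foldl pvUpdB none (pvCandsFrom t (pvB_codons seq.toList) k).reverse).map
          (fun c : Nat × Nat => ((c.1 : Int), (c.2 : Int)))) := by
  induction hd : (pvB_codons seq.toList).length - k generalizing k with
  | zero =>
    have hkm : k = (pvB_codons seq.toList).length := by omega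
    subst hkm
    rw [pvRangeNeg_nil, pvFS_none t _ _ le_rfl, pvCandsFrom_nil t _ _ le_rfl]
    rfl
  | succ d ih =>
    have hklt : k < (pvB_codons seq.toList).length := by omega
    rw [pvRangeNeg_snoc _ k hklt, List.foldl_append]
    rw [ih (k + 1) (by omega) (by omega)]
    simp only [List.foldl_cons, List.foldl_nil, PySem.List.pyGetD_natCast]
    have hQwf : pvWF (pvB_codons seq.toList).length
        (List.foldl pvUpdB none (pvCandsFrom t (pvB_codons seq.toList) (k + 1)).reverse) := by
      apply pvUpdB_fold_wf
      · intro c hc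
        exact pvCandsFrom_mem_wf t _ (k + 1) c (List.mem_reverse.mp hc)
      · trivial
    rw [pvCandsFrom_cons t _ k hklt, List.reverse_append, List.foldl_append]
    by_cases hct : (pvB_codons seq.toList).getD k "" = t
    · have hbeq : ((pvB_codons seq.toList).getD k "" == t) = true := beq_iff_eq.mpr hct
      rw [pvFS_step t _ k hklt, if_pos hct]
      simp only [hbeq, if_true]
      by_cases hatg : (pvB_codons seq.toList).getD k "" = "ATG"
      · have hbeq2 : ((pvB_codons seq.toList).getD k "" == "ATG") = true := beq_iff_eq.mpr hatg
        simp only [hbeq2, if_true, if_pos hatg, pvFS_step t _ k hklt, if_pos hct]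
        simp only [Option.map_some, Option.toList_some, List.reverse_cons, List.reverse_nil,
          List.nil_append, List.foldl_cons, List.foldl_nil]
        cases hQ : List.foldl pvUpdB none (pvCandsFrom t (pvB_codons seq.toList) (k + 1)).reverse with
        | none => rfl
        | some b0 =>
          obtain ⟨hb1, hb2⟩ : b0.1 ≤ b0.2 ∧ b0.2 < _ := by rw [hQ] at hQwf; exact hQwf
          simp only [Option.map_some]
          show (_, if (k : Int) - (k : Int) ≥ (b0.2 : Int) - (b0.1 : Int) then _ else _) = _
          by_cases hge : k - k ≥ b0.2 - b0.1
          · rw [if_pos (by omega), show pvUpdB (some b0) (k, k) = some (k, k) by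
              simp only [pvUpdB]; rw [if_pos (by omega)]]
            rfl
          · rw [if_neg (by omega), show pvUpdB (some b0) (k, k) = some b0 by
              simp only [pvUpdB]; rw [if_neg (by omega)]]
            simp
      · have hbeq2 : ((pvB_codons seq.toList).getD k "" == "ATG") = false := by
          simp only [beq_eq_false_iff_ne, ne_eq]; exact hatg
        simp only [hbeq2, Bool.false_eq_true, if_false, if_neg hatg]
        rfl
    · have hbeq : ((pvB_codons seq.toList).getD k "" == t) = false := by
        simp only [beq_eq_false_iff_ne, ne_eq]; exact hct
      rw [pvFS_step t _ k hklt, if_neg hct]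
      simp only [hbeq, Bool.false_eq_true, if_false]
      by_cases hatg : (pvB_codons seq.toList).getD k "" = "ATG"
      · have hbeq2 : ((pvB_codons seq.toList).getD k "" == "ATG") = true := beq_iff_eq.mpr hatg
        simp only [hbeq2, if_true, if_pos hatg, pvFS_step t _ k hklt, if_neg hct]
        cases hfs : pvFS t (pvB_codons seq.toList) (k + 1) with
        | none =>
          simp only [Option.map_none, Option.toList_none, List.reverse_nil, List.nil_append,
            List.foldl_nil]
        | some j =>
          obtain ⟨hkj, hjm⟩ := pvFS_bounds t _ (k + 1) j hfs
          simp only [Option.map_some, Option.toList_some, List.reverse_cons, List.reverse_nil,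
            List.nil_append, List.foldl_cons, List.foldl_nil]
          cases hQ : List.foldl pvUpdB none (pvCandsFrom t (pvB_codons seq.toList) (k + 1)).reverse with
          | none => rfl
          | some b0 =>
            obtain ⟨hb1, hb2⟩ : b0.1 ≤ b0.2 ∧ b0.2 < _ := by rw [hQ] at hQwf; exact hQwf
            simp only [Option.map_some]
            by_cases hge : j - k ≥ b0.2 - b0.1
            · rw [if_pos (show (j : Int) - (k : Int) ≥ (b0.2 : Int) - (b0.1 : Int) by omega),
                show pvUpdB (some b0) (k, j) = some (k, j) by
                  simp only [pvUpdB]; rw [if_pos (by omega)]]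
              simp
            · rw [if_neg (show ¬ ((j : Int) - (k : Int) ≥ (b0.2 : Int) - (b0.1 : Int)) by omega),
                show pvUpdB (some b0) (k, j) = some b0 by
                  simp only [pvUpdB]; rw [if_neg (by omega)]]
              simp
      · have hbeq2 : ((pvB_codons seq.toList).getD k "" == "ATG") = false := by
          simp only [beq_eq_false_iff_ne, ne_eq]; exact hatg
        simp only [hbeq2, Bool.false_eq_true, if_false, if_neg hatg]
        rfl

-- ===== counting the codons of the chosen ORF =====
theorem pvRange3_exact (r : Nat) :
    PySem.List.pyRange 0 ((3 * r : Nat) : Int) 3 = (List.range r).map (fun u => ((3 * u : Nat) : Int)) := by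
  rw [PySem.List.pyRange_of_pos 0 _ (by norm_num)]
  by_cases h : (0 : Int) < ((3 * r : Nat) : Int)
  · have h1 : ((((3 * r : Nat) : Int) - 0 + 3 - 1) / 3).toNat = r := by omega
    simp only [if_pos h, h1]
    apply List.map_congr_left
    intro q _
    push_cast
    ring
  · have h1 : r = 0 := by omega
    rw [if_neg h]
    simp [h1]

theorem pvOrf_codon (seq : String) (p q u : Nat)
    (hq : q < (pvB_codons seq.toList).length) (hpq : p ≤ q) (hu : u ≤ q - p) :
    PySem.Str.slice (pvOrfStr seq.toList (some (p, q))) (some ((3 * u : Nat) : Int))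
        (some (((3 * u : Nat) : Int) + 3)) = (pvB_codons seq.toList).getD (p + u) "" := by
  have hmn : (pvB_codons seq.toList).length = seq.toList.length / 3 := pvB_codons_length _
  apply String.toList_inj.mp
  rw [pvSlice_toList]
  have h3 : ((3 * u : Nat) : Int) + 3 = (((3 * u + 3 : Nat)) : Int) := by push_cast; ring
  rw [h3, PySem.List.slice_natCast, pvB_codons_getD seq.toList (p + u) (by omega)]
  simp only [pvOrfStr, String.toList_ofList]
  rw [List.drop_take, List.drop_drop, List.take_take]
  congr 1
  · omega
  · congr 1
    omega

theorem pvFold_range_getD {α β : Type} (l : List α) (dflt : α) (g : β → α → β) (d0 : β) :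
    (List.range l.length).foldl (fun d u => g d (l.getD u dflt)) d0 = l.foldl g d0 := by
  induction l using List.reverseRecOn generalizing d0 with
  | nil => rfl
  | append_singleton l' x ih =>
    rw [List.length_append, List.length_singleton, List.range_succ, List.foldl_append,
      List.foldl_append]
    rw [PySem.List.foldl_congr_mem _ _ (fun d u => g d (l'.getD u dflt)) d0
      (by
        intro acc u hu
        rw [List.mem_range] at hu
        congr 1
        unfold List.getD
        rw [List.getElem?_append_left hu])]
    rw [ih]
    simp only [List.foldl_cons, List.foldl_nil]
    congr 1
    unfold List.getD
    rw [List.getElem?_concat_length]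
    rfl

theorem pvOrfStr_ne_empty (seq : String) (p q : Nat)
    (hwf : pvWF ((pvB_codons seq.toList).length) (some (p, q))) :
    (pvOrfStr seq.toList (some (p, q)) == "") = false := by
  have hmn : (pvB_codons seq.toList).length = seq.toList.length / 3 := pvB_codons_length _
  obtain ⟨h1, h2⟩ := hwf
  rw [beq_eq_false_iff_ne]
  intro h
  have := congrArg (fun w : String => w.toList.length) h
  simp only [pvOrfStr, String.toList_ofList] at this
  rw [pvTake_len seq.toList (3 * p) (3 * (q - p) + 3) (by omega)] at this
  simp at this

theorem pvModify_eq_insert (d : PySem.Dict String Int) (c : String) :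
    d.modify c 0 (· + 1) = d.insert c (d.getD c 0 + 1) := PySem.Dict.ext_iff.mpr rfl

-- ===== per-sequence equality =====
theorem pvSeq_eq (t : String) (d : PySem.Dict String Int) (seq : String) :
    pvA_seqStep t d seq = pvB_seqStep t d seq := by
  have hmn : (pvB_codons seq.toList).length = seq.toList.length / 3 := pvB_codons_length _
  have H1 := pvA_fold_spec seq t 0 (by omega) none trivial
  have H2 := pvB_fold_spec seq t 0 (by omega)
  have hc0 : ((3 * 0 : Nat) : Int) = (0 : Int) := by norm_num
  rw [hc0] at H1
  have hc1 : ((0 : Nat) : Int) - 1 = (-1 : Int) := by norm_num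
  rw [hc1] at H2
  simp only [pvA_seqStep, pvB_seqStep, PySem.Str.len_eq]
  rw [show pvOrfStr seq.toList none = "" from rfl] at H1
  rw [H1, H2]
  rw [show List.foldl pvUpdB none (pvCandsFrom t (pvB_codons seq.toList) 0).reverse =
        List.foldl pvUpdA none (pvCandsFrom t (pvB_codons seq.toList) 0) from
      pvK4 (pvCandsFrom t (pvB_codons seq.toList) 0)]
  cases hR : List.foldl pvUpdA none (pvCandsFrom t (pvB_codons seq.toList) 0) with
  | none => rfl
  | some pq =>
    obtain ⟨p, q⟩ := pq
    have hwf : pvWF ((pvB_codons seq.toList).length) (some (p, q)) := by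
      rw [← hR]
      apply pvUpdA_fold_wf
      · intro c hc
        exact pvCandsFrom_mem_wf t _ 0 c hc
      · trivial
    obtain ⟨hpq, hqm⟩ := hwf
    rw [pvOrfStr_ne_empty seq p q ⟨hpq, hqm⟩]
    simp only [Bool.false_eq_true, if_false, Option.map_some]
    have hlen0 : (pvOrfStr seq.toList (some (p, q))).toList.length = 3 * (q - p) + 3 := by
      simp only [pvOrfStr, String.toList_ofList]
      exact pvTake_len _ _ _ (by omega)
    have hlen3 : ((3 * (q - p) + 3 : Nat) : Int) - 3 = ((3 * (q - p) : Nat) : Int) := by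
      push_cast
      ring
    rw [hlen0, hlen3, pvRange3_exact (q - p), List.foldl_map]
    have hcong :
        List.foldl
          (fun (d : PySem.Dict String Int) (u : Nat) =>
            d.modify (PySem.Str.slice (pvOrfStr seq.toList (some (p, q)))
              (some ((3 * u : Nat) : Int)) (some (((3 * u : Nat) : Int) + 3))) 0 (fun x => x + 1))
          d (List.range (q - p)) =
        List.foldl
          (fun (d : PySem.Dict String Int) (u : Nat) =>
            d.insert ((pvB_codons seq.toList).getD (p + u) "")
              (d.getD ((pvB_codons seq.toList).getD (p + u) "") 0 + 1))
          d (List.range (q - p)) := by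
      apply PySem.List.foldl_congr_mem
      intro acc u hu
      rw [List.mem_range] at hu
      rw [pvOrf_codon seq p q u hqm hpq (by omega), pvModify_eq_insert]
    rw [hcong]
    rw [show PySem.List.slice (pvB_codons seq.toList) (some ((p : Nat) : Int)) (some ((q : Nat) : Int)) =
        ((pvB_codons seq.toList).drop p).take (q - p) from PySem.List.slice_natCast _ _ _]
    rw [← pvFold_range_getD (((pvB_codons seq.toList).drop p).take (q - p)) ""
      (fun d c => d.insert c (d.getD c 0 + 1)) d]
    have hlen : (((pvB_codons seq.toList).drop p).take (q - p)).length = q - p := by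
      rw [List.length_take, List.length_drop]
      omega
    rw [hlen]
    apply PySem.List.foldl_congr_mem
    intro acc u hu
    rw [List.mem_range] at hu
    have hget : (((pvB_codons seq.toList).drop p).take (q - p)).getD u "" =
        (pvB_codons seq.toList).getD (p + u) "" := by
      unfold List.getD
      rw [List.getElem?_take_of_lt hu, List.getElem?_drop]
    rw [hget]

-- ===== VERDICT (by name: the statement is the Claim_ definition above) =====
theorem count_codon_frequency_spec : Claim_equal_count_codon_frequency := by
  intro sequences target_stop _
  unfold Spec_count_codon_frequency
  unfold count_codon_frequency count_codon_frequency_alt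
  rw [show (fun (d : PySem.Dict String Int) (seq : String) => pvA_seqStep target_stop d seq) =
      (fun (d : PySem.Dict String Int) (seq : String) => pvB_seqStep target_stop d seq) from
    funext fun d => funext fun seq => pvSeq_eq target_stop d seq]
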